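-- pv_equiv track=rewrite | github.com/waltbai/ScriptEventExtraction | step_6.py | match_entity
-- ===== SOURCE A (Python) =====
-- def match_entity(head_idx, entities):
--     """Match event argument head with an entity."""
--     if head_idx is None:
--         return None, None
--     ent_id, ent_span = None, None
--     for idx, entity in enumerate(entities):
--         for span in entity:
--             if span[0] <= head_idx <= span[1]:
--                 if ent_span is None:
--                     ent_id, ent_span = idx, span
--                 # Find the smallest coref span that contains the headword
--                 elif ent_span[1] - ent_span[0] > span[1] - span[0]:
--                     ent_id, ent_span = idx, span
--     return ent_id, ent_span
-- ===== SOURCE B (Python) =====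
-- def match_entity(head_idx, entities):
--     """Match event argument head with an entity."""
--     if head_idx is None:
--         return None, None
--     flat = [(idx, span) for idx, entity in enumerate(entities) for span in entity]
--     # stable sort by span width: among spans of equal width the earlier one comes first
--     for idx, span in sorted(flat, key=lambda t: t[1][1] - t[1][0]):
--         if span[0] <= head_idx <= span[1]:
--             return idx, span
--     return None, None
-- ===== Notes on version B (the rewrite author's own statement) =====
-- stated objective: alternative
-- what changed: Replaces A's nested scan that tracks the best-so-far shortest containing span by sort-then-scan: flatten all spans with their entity index, stable-sort them by width, and return the first sorted span containing the head index (stability preserves A's earliest-on-tie choice).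
import Mathlib
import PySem

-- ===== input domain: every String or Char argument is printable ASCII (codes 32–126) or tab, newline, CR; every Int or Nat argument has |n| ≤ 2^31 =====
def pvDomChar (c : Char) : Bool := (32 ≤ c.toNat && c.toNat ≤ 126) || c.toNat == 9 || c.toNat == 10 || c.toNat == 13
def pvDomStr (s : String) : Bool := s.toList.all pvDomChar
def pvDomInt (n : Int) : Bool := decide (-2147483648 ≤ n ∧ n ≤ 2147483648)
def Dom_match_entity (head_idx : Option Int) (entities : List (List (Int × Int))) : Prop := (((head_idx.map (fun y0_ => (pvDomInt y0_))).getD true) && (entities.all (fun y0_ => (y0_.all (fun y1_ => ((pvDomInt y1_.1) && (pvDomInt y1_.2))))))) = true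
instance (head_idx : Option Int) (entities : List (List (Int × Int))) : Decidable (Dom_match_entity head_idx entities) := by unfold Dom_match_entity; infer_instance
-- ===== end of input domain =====

-- B replaces A's best-so-far nested scan by sort-then-scan: flatten spans with indices,
-- stable-sort by width, return the first sorted span containing the head; objective: alternative.


-- ===== PORT A =====
-- the body of A's inner loop: update the (ent_id, ent_span) state with one span
def pvStepA (h : Int) (idx : Int) (st : Option Int × Option (Int × Int)) (span : Int × Int) :
    Option Int × Option (Int × Int) :=
  if span.1 ≤ h ∧ h ≤ span.2 then
    match st.2 with
    | none => (some idx, some span)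
    | some m => if m.2 - m.1 > span.2 - span.1 then (some idx, some span) else st
  else st

def match_entity (head_idx : Option Int) (entities : List (List (Int × Int))) : Option Int × (Option (Int × Int)) :=
  match head_idx with
  | none => (none, none)
  | some h =>
    (PySem.List.enumerate entities).foldl
      (fun st p => p.2.foldl (pvStepA h p.1) st) (none, none)

-- ===== PORT B =====
-- flat = [(idx, span) for idx, entity in enumerate(entities) for span in entity]
def pvFlat (entities : List (List (Int × Int))) : List (Int × (Int × Int)) :=
  (PySem.List.enumerate entities).flatMap (fun q => q.2.map (fun s => (q.1, s)))

def match_entity_alt (head_idx : Option Int) (entities : List (List (Int × Int))) : Option Int × (Option (Int × Int)) :=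
  match head_idx with
  | none => (none, none)
  | some h =>
    match (PySem.List.sorted (pvFlat entities) (fun t => t.2.2 - t.2.1)).find?
        (fun t => decide (t.2.1 ≤ h ∧ h ≤ t.2.2)) with
    | some c => (some c.1, some c.2)
    | none => (none, none)

-- ===== PRECONDITION & SPEC =====
def Spec_match_entity (head_idx : Option Int) (entities : List (List (Int × Int))) (out : Option Int × (Option (Int × Int))) : Prop := out = match_entity_alt head_idx entities
instance (head_idx : Option Int) (entities : List (List (Int × Int))) (out : Option Int × (Option (Int × Int))) : Decidable (Spec_match_entity head_idx entities out) := by unfold Spec_match_entity; infer_instance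

-- ===== CLAIM (what is proved, stated in full; the proofs are below) =====
def Claim_equal_match_entity : Prop := ∀ (head_idx : Option Int) (entities : List (List (Int × Int))), Dom_match_entity head_idx entities → Spec_match_entity head_idx entities (match_entity head_idx entities)

-- ===== LEMMAS AND PROOFS =====

-- abbreviations for the proofs: width key, containment predicate, A's min-tracking step
def pvW (t : Int × (Int × Int)) : Int := t.2.2 - t.2.1

def pvP (h : Int) (t : Int × (Int × Int)) : Bool := decide (t.2.1 ≤ h ∧ h ≤ t.2.2)

def pvEnc (o : Option (Int × (Int × Int))) : Option Int × Option (Int × Int) :=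
  match o with
  | none => (none, none)
  | some c => (some c.1, some c.2)

def pvMinStep (acc : Option (Int × (Int × Int))) (x : Int × (Int × Int)) : Option (Int × (Int × Int)) :=
  match acc with
  | none => some x
  | some m => if pvW x < pvW m then some x else some m

-- A's inner loop over one entity's spans = the min-tracking fold over that entity's candidates
theorem pvInner (h idx : Int) (spans : List (Int × Int)) (acc : Option (Int × (Int × Int))) :
    spans.foldl (pvStepA h idx) (pvEnc acc) =
      pvEnc (((spans.map (fun s => (idx, s))).filter (pvP h)).foldl pvMinStep acc) := by
  induction spans generalizing acc with
  | nil => simp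
  | cons s t ih =>
    by_cases hc : s.1 ≤ h ∧ h ≤ s.2
    · cases acc with
      | none => simpa [pvStepA, pvMinStep, pvEnc, pvP, pvW, hc] using ih (some (idx, s))
      | some m =>
        by_cases hw : m.2.2 - m.2.1 > s.2 - s.1
        · simpa [pvStepA, pvMinStep, pvEnc, pvP, pvW, hc, hw,
            show s.2 - s.1 < m.2.2 - m.2.1 from hw] using ih (some (idx, s))
        · have hw' : ¬ (s.2 - s.1 < m.2.2 - m.2.1) := hw
          simpa [pvStepA, pvMinStep, pvEnc, pvP, pvW, hc, hw, hw'] using ih (some m)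
    · simpa [pvStepA, pvMinStep, pvEnc, pvP, hc] using ih acc

-- A's whole nested loop = the min-tracking fold over the filtered flattened list
theorem pvAeq (h : Int) (entities : List (List (Int × Int))) :
    match_entity (some h) entities =
      pvEnc (((pvFlat entities).filter (pvP h)).foldl pvMinStep none) := by
  show (PySem.List.enumerate entities).foldl
      (fun st p => p.2.foldl (pvStepA h p.1) st) (pvEnc none)
    = pvEnc (((pvFlat entities).filter (pvP h)).foldl pvMinStep none)
  rw [pvFlat, List.filter_flatMap]
  generalize PySem.List.enumerate entities = L
  suffices aux : ∀ (L : List (Int × List (Int × Int))) (acc : Option (Int × (Int × Int))),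
      L.foldl (fun st p => p.2.foldl (pvStepA h p.1) st) (pvEnc acc)
        = pvEnc ((L.flatMap (fun a => (a.2.map (fun s => (a.1, s))).filter (pvP h))).foldl
            pvMinStep acc) from aux L none
  intro L
  induction L with
  | nil => intro acc; simp
  | cons q t ih =>
    intro acc
    simp only [List.foldl_cons, List.flatMap_cons, List.foldl_append]
    rw [pvInner h q.1 q.2 acc, ih]

-- head of an insertion = A's min-tracking step on the head
theorem pvHeadInsert (x : Int × (Int × Int)) (s : List (Int × (Int × Int))) :
    (PySem.List.insertBy (fun a b => decide (pvW a < pvW b)) x s).head? =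
      pvMinStep s.head? x := by
  cases s with
  | nil => rfl
  | cons a t =>
    by_cases hlt : pvW x < pvW a
    · simp [PySem.List.insertBy, pvMinStep, hlt]
    · simp [PySem.List.insertBy, pvMinStep, hlt]

-- first minimal-width element = head of the stable sort by width
theorem pvMinEqHeadSorted (ys : List (Int × (Int × Int))) :
    ys.foldl pvMinStep none = (PySem.List.sorted ys pvW).head? := by
  rw [PySem.List.sorted_eq_foldl_insertBy]
  have key : ∀ (acc : List (Int × (Int × Int))),
      (ys.foldl (fun acc x => PySem.List.insertBy (fun a b => decide (pvW a < pvW b)) x acc) acc).head?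
        = ys.foldl pvMinStep acc.head? := by
    induction ys with
    | nil => intro acc; rfl
    | cons y t ih =>
      intro acc
      simp only [List.foldl_cons]
      rw [ih, pvHeadInsert]
  simpa using (key []).symm

-- sorting an extra last element = inserting it into the sorted list
theorem pvSortedSnoc (ys : List (Int × (Int × Int))) (x : Int × (Int × Int)) :
    PySem.List.sorted (ys ++ [x]) pvW =
      PySem.List.insertBy (fun a b => decide (pvW a < pvW b)) x (PySem.List.sorted ys pvW) := by
  rw [PySem.List.sorted_eq_foldl_insertBy, List.foldl_append,
    ← PySem.List.sorted_eq_foldl_insertBy]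
  rfl

-- filtering out an element never changes the filter of an insertion
theorem pvFilterInsert_neg (p : Int × (Int × Int) → Bool) (x : Int × (Int × Int))
    (s : List (Int × (Int × Int))) (hx : p x = false) :
    (PySem.List.insertBy (fun a b => decide (pvW a < pvW b)) x s).filter p = s.filter p := by
  induction s with
  | nil => simp [PySem.List.insertBy, hx]
  | cons a t ih =>
    by_cases hlt : pvW x < pvW a
    · simp [PySem.List.insertBy, hlt, hx]
    · by_cases ha : p a = true
      · simp [PySem.List.insertBy, hlt, ha, ih]
      · simp [PySem.List.insertBy, hlt, ha, ih]

-- on a width-sorted list, filtering commutes with inserting a kept element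
theorem pvFilterInsert_pos (p : Int × (Int × Int) → Bool) (x : Int × (Int × Int))
    (s : List (Int × (Int × Int))) (hx : p x = true)
    (hs : s.Pairwise (fun a b => pvW a ≤ pvW b)) :
    (PySem.List.insertBy (fun a b => decide (pvW a < pvW b)) x s).filter p =
      PySem.List.insertBy (fun a b => decide (pvW a < pvW b)) x (s.filter p) := by
  induction s with
  | nil => simp [PySem.List.insertBy, hx]
  | cons a t ih =>
    have hat : ∀ b ∈ t, pvW a ≤ pvW b := (List.pairwise_cons.mp hs).1
    have ht : t.Pairwise (fun a b => pvW a ≤ pvW b) := (List.pairwise_cons.mp hs).2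
    by_cases hlt : pvW x < pvW a
    · by_cases ha : p a = true
      · simp [PySem.List.insertBy, hlt, hx, ha]
      · -- a is dropped on both sides; every kept element of t still has width above pvW x
        have e1 : (PySem.List.insertBy (fun a b => decide (pvW a < pvW b)) x (a :: t)).filter p
            = x :: t.filter p := by simp [PySem.List.insertBy, hlt, hx, ha]
        have e2 : (a :: t).filter p = t.filter p := by simp [ha]
        rw [e1, e2]
        cases hft : t.filter p with
        | nil => rfl
        | cons z zs =>
          have hz : z ∈ t := List.mem_of_mem_filter (hft ▸ List.mem_cons_self)
          have hxz : pvW x < pvW z := lt_of_lt_of_le hlt (hat z hz)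
          simp [PySem.List.insertBy, hxz]
    · by_cases ha : p a = true
      · simp [PySem.List.insertBy, hlt, ha, ih ht]
      · simp [PySem.List.insertBy, hlt, ha, ih ht]

-- stable sort commutes with filtering
theorem pvSortFilter (p : Int × (Int × Int) → Bool) (xs : List (Int × (Int × Int))) :
    PySem.List.sorted (xs.filter p) pvW = (PySem.List.sorted xs pvW).filter p := by
  induction xs using List.reverseRecOn with
  | nil => rfl
  | append_singleton ys x ih =>
    have hs : (PySem.List.sorted ys pvW).Pairwise (fun a b => pvW a ≤ pvW b) :=
      PySem.List.sorted_pairwise ys pvW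
    rw [List.filter_append, pvSortedSnoc]
    by_cases hx : p x = true
    · simp only [List.filter_cons, hx, if_pos, List.filter_nil]
      rw [pvSortedSnoc, ih, pvFilterInsert_pos p x _ hx hs]
    · have hx' : p x = false := by simpa using hx
      simp only [List.filter_cons, hx', Bool.false_eq_true, if_false, List.filter_nil,
        List.append_nil]
      rw [ih, pvFilterInsert_neg p x _ hx']

-- ===== VERDICT (by name: the statement is the Claim_ definition above) =====
theorem match_entity_spec : Claim_equal_match_entity := by
  intro head_idx entities _
  unfold Spec_match_entity
  cases head_idx with
  | none => rfl
  | some h =>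
    rw [pvAeq, pvMinEqHeadSorted, pvSortFilter, List.head?_filter]
    have hP : pvP h = (fun t : Int × (Int × Int) => decide (t.2.1 ≤ h ∧ h ≤ t.2.2)) := rfl
    have hW : pvW = (fun t : Int × (Int × Int) => t.2.2 - t.2.1) := rfl
    rw [hP, hW]
    simp only [match_entity_alt]
    cases ((PySem.List.sorted (pvFlat entities) (fun t => t.2.2 - t.2.1)).find?
        (fun t => decide (t.2.1 ≤ h ∧ h ≤ t.2.2))) with
    | none => rfl
    | some c => rfl
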